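-- pv_equiv track=rewrite | github.com/tzwolf/apt-mirror | apt-mirror.py | distribute_index
-- ===== SOURCE A (Python) =====
-- def distribute_index(index, n):
-- 	index.sort()
-- 	total = len(index)
-- 	group = len(index)//n
-- 	odd = total - group*n
-- 	if odd: odd = index[-odd:]
-- 	else: odd = []
--
-- 	for one in zip(*list(index[i*n:(i+1)*n] for i in \
-- 		range(0, group))): odd.extend(one)
-- 	index.clear()
-- 	index.extend(odd)
-- 	return index
-- ===== SOURCE B (Python) =====
-- def distribute_index(index, n):
-- 	index.sort()
-- 	total = len(index)
-- 	group = total // n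
-- 	odd = total - group * n
-- 	result = list(index[-odd:]) if odd else []
-- 	if group > 0:
-- 		body = group * n
-- 		off = len(result)
-- 		result += [0] * body
-- 		for k, v in enumerate(index[:body]):
-- 			q, r = divmod(k, n)
-- 			result[off + r * group + q] = v
-- 	index[:] = result
-- 	return index
-- ===== Notes on version B (the rewrite author's own statement) =====
-- stated objective: alternative
-- what changed: replaces building row slices and transposing them with zip(*rows) by a single scatter pass: the result is preallocated and each sorted element is written directly into its final slot, computed in closed form as off + (k % n) * group + k // n
import Mathlib
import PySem

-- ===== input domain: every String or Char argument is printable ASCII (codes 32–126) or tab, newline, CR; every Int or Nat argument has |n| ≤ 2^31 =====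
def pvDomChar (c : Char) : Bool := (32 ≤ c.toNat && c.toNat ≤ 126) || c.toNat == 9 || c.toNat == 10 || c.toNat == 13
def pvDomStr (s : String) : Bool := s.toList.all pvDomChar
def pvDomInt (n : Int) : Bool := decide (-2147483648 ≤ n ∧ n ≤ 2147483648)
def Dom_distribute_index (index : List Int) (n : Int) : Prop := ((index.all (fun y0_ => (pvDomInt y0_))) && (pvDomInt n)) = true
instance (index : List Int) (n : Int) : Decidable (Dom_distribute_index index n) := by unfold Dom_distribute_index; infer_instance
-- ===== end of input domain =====

-- B replaces A's rows + zip(*rows) transpose by a single scatter pass: each element's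
-- final slot is computed in closed form (off + (k % n) * group + k // n) and written into
-- a preallocated result (alternative algorithm, same cost). Both Pythons mutate `index`
-- in place identically (sort, then rewrite its contents); the equivalence proved here is
-- about the return value (the rewritten list itself).

-- ===== PORT A =====
-- zip(*rows) ported by its contract (PySem has no n-ary zip): there are
-- min(len(row) for row in rows) columns (0 if rows == []), and column j lists the
-- j-th element of every row in order; exact for every list of rows.
def pyZipN (rows : List (List Int)) : List (List Int) :=
  (List.range (((rows.map List.length).min?).getD 0)).map
    (fun j => rows.map (fun r => r.getD j 0))

def distribute_index (index : List Int) (n : Int) : List Int :=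
  let sorted := PySem.List.sorted index (fun x => x) false
  let total : Int := sorted.length
  let group : Int := PySem.Int.floordiv total n
  let odd : Int := total - group * n
  let oddL : List Int :=
    if odd ≠ 0 then PySem.List.slice sorted (some (-odd)) none else []
  let rows := (PySem.List.pyRange 0 group 1).map
    (fun i => PySem.List.slice sorted (some (i * n)) (some ((i + 1) * n)))
  let res := (pyZipN rows).foldl (fun acc one => acc ++ one) oddL
  res

-- ===== PORT B =====
def distribute_index_alt (index : List Int) (n : Int) : List Int :=
  let sorted := PySem.List.sorted index (fun x => x) false
  let total : Int := sorted.length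
  let group : Int := PySem.Int.floordiv total n
  let odd : Int := total - group * n
  let result : List Int :=
    if odd ≠ 0 then PySem.List.slice sorted (some (-odd)) none else []
  if 0 < group then
    let body : Int := group * n
    let off : Int := (result.length : Int)
    let start := result ++ List.replicate body.toNat 0
    -- q, r = divmod(k, n): here 0 < group forces 0 < n, so divmod(k, n) = (floordiv, mod);
    -- result[pos] = v with 0 ≤ pos < len(result), so pySetD is exact.
    (PySem.List.enumerate (PySem.List.slice sorted none (some body)) 0).foldl
      (fun acc kv =>
        PySem.List.pySetD acc
          (off + PySem.Int.mod kv.1 n * group + PySem.Int.floordiv kv.1 n) kv.2)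
      start
  else result

-- ===== PRECONDITION & SPEC =====
-- n = 0 makes Python's `len(index)//n` raise ZeroDivisionError; that is all Pre_ excludes.
def Pre_distribute_index (index : List Int) (n : Int) : Prop := n ≠ 0
instance (index : List Int) (n : Int) : Decidable (Pre_distribute_index index n) := by
  unfold Pre_distribute_index; infer_instance
def pvWitness_distribute_index : List Int × Int := ([3, 1, 2, 5, 4, 7, 6], 3)

def Spec_distribute_index (index : List Int) (n : Int) (out : List Int) : Prop := out = distribute_index_alt index n
instance (index : List Int) (n : Int) (out : List Int) : Decidable (Spec_distribute_index index n out) := by unfold Spec_distribute_index; infer_instance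

-- ===== CLAIM (what is proved, stated in full; the proofs are below) =====
def Claim_equal_distribute_index : Prop := ∀ (index : List Int) (n : Int), Dom_distribute_index index n → Pre_distribute_index index n → Spec_distribute_index index n (distribute_index index n)

-- ===== LEMMAS AND PROOFS =====
-- column-major flattening of the first g*N elements of xs; both ports' results reduce to it
def colFlat (xs : List Int) (N g : Nat) : List Int :=
  (List.range N).flatMap (fun j => (List.range g).map (fun i => xs.getD (i*N+j) 0))

lemma fdiv_nonpos_of_nonneg_of_neg (a b : Int) (ha : 0 ≤ a) (hb : b < 0) : a.fdiv b ≤ 0 := by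
  have h1 : a / b ≤ 0 := by
    have h0 : 0 ≤ a / (-b) := Int.ediv_nonneg ha (by omega)
    rw [Int.ediv_neg] at h0; omega
  rw [Int.fdiv_eq_ediv]; split_ifs <;> omega

lemma foldl_append_flatten (l : List (List Int)) (init : List Int) :
    l.foldl (fun a b => a ++ b) init = init ++ l.flatten := by
  induction l generalizing init with
  | nil => simp
  | cons x t ih => simp [ih, List.append_assoc]

lemma min?_replicate_some (g N : Nat) : (List.replicate (g+1) N).min? = some N := by
  induction g with
  | zero => rfl
  | succ g ih => rw [List.replicate_succ, List.min?_cons, ih]; simp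

lemma min?_replicate_succ (g N : Nat) : ((List.replicate (g+1) N).min?).getD 0 = N := by
  rw [min?_replicate_some]; rfl

lemma zip_flat (xs : List Int) (N g : Nat) (hg : g * N ≤ xs.length) :
    (pyZipN ((List.range g).map (fun i => (xs.drop (i*N)).take N))).flatMap id
    = colFlat xs N g := by
  have hrowlen : ((List.range g).map (fun i => (xs.drop (i*N)).take N)).map List.length
      = List.replicate g N := by
    rw [List.map_map]
    have := List.map_eq_replicate_iff
      (l := List.range g) (f := List.length ∘ fun i => (xs.drop (i*N)).take N) (b := N)
    rw [List.length_range] at this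
    apply this.mpr
    intro i hi
    simp only [List.mem_range] at hi
    simp only [Function.comp, List.length_take, List.length_drop]
    have : i * N + N ≤ xs.length := le_trans (by nlinarith) hg
    omega
  cases g with
  | zero =>
    simp [pyZipN, colFlat]
  | succ g' =>
    unfold pyZipN colFlat
    rw [hrowlen, min?_replicate_succ]
    rw [List.flatMap_def, List.map_map, List.flatMap_def]
    congr 1
    apply List.map_congr_left
    intro j hj
    simp only [List.mem_range] at hj
    simp only [Function.comp, id_eq, List.map_map]
    apply List.map_congr_left
    intro i hi
    simp only [List.mem_range] at hi
    simp only [Function.comp]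
    rw [List.getD_eq_getElem?_getD, List.getD_eq_getElem?_getD,
        List.getElem?_take_of_lt hj, List.getElem?_drop]

-- A's zip-transpose fold reduces to the column-major flattening
lemma keyA (xs : List Int) (N g : Nat) (hg : (g : Int) * N ≤ (xs.length : Int)) (init : List Int) :
    (pyZipN ((PySem.List.pyRange 0 (g : Int) 1).map
        (fun i => PySem.List.slice xs (some (i * (N : Int))) (some ((i + 1) * (N : Int)))))).foldl
        (fun acc one => acc ++ one) init
    = init ++ colFlat xs N g := by
  rw [foldl_append_flatten, ← List.flatMap_id]
  congr 1
  rw [PySem.List.pyRange_zero_natCast, List.map_map]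
  have hrows : ((List.range g).map
      ((fun i => PySem.List.slice xs (some (i * (N:Int))) (some ((i + 1) * (N:Int)))) ∘ fun (k : Nat) => (k : Int)))
      = (List.range g).map (fun i => (xs.drop (i*N)).take N) := by
    apply List.map_congr_left
    intro i _
    simp only [Function.comp]
    have h1 : ((i : Int) * (N : Int)) = ((i * N : Nat) : Int) := by push_cast; ring
    have h2 : (((i : Int) + 1) * (N : Int)) = (((i + 1) * N : Nat) : Int) := by push_cast; ring
    rw [h1, h2, PySem.List.slice_natCast]
    have h4 : (i + 1) * N - i * N = N := by
      rw [Nat.add_mul, Nat.one_mul, Nat.add_sub_cancel_left]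
    rw [h4]
  rw [hrows, zip_flat xs N g (by exact_mod_cast hg)]

lemma flatMap_range_eq_map (f : Nat → Nat → Int) (N g : Nat) :
    (List.range N).flatMap (fun j => (List.range g).map (fun i => f i j))
    = (List.range (N*g)).map (fun t => f (t % g) (t / g)) := by
  rcases Nat.eq_zero_or_pos g with hg | hg
  · subst hg; simp
  induction N with
  | zero => simp
  | succ N ih =>
    rw [List.range_succ, List.flatMap_append, ih, Nat.succ_mul, List.range_add, List.map_append]
    congr 1
    simp only [List.flatMap_cons, List.flatMap_nil, List.append_nil, List.map_map]
    apply List.map_congr_left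
    intro i hi
    simp only [List.mem_range] at hi
    simp only [Function.comp]
    congr 1
    · rw [Nat.add_comm (N*g) i, Nat.add_mul_mod_self_right, Nat.mod_eq_of_lt hi]
    · rw [Nat.add_comm (N*g) i, Nat.add_mul_div_right _ _ hg, Nat.div_eq_of_lt hi, Nat.zero_add]

lemma colFlat_eq_map (xs : List Int) (N g : Nat) :
    colFlat xs N g = (List.range (N*g)).map (fun t => xs.getD ((t % g) * N + t / g) 0) :=
  flatMap_range_eq_map (fun i j => xs.getD (i*N+j) 0) N g

lemma length_foldl_set (ps : List (Int × Nat)) (pos : Nat → Nat) (start : List Int) :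
    (ps.foldl (fun acc kv => acc.set (pos kv.2) kv.1) start).length = start.length := by
  induction ps generalizing start with
  | nil => rfl
  | cons x t ih => simp [List.foldl_cons, ih]

lemma getElem?_foldl_set_miss (ps : List (Int × Nat)) (pos : Nat → Nat) (start : List Int) (p : Nat)
    (h : ∀ kv ∈ ps, pos kv.2 ≠ p) :
    (ps.foldl (fun acc kv => acc.set (pos kv.2) kv.1) start)[p]? = start[p]? := by
  induction ps generalizing start with
  | nil => rfl
  | cons x t ih =>
    rw [List.foldl_cons, ih _ (fun kv hkv => h kv (List.mem_cons_of_mem _ hkv)),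
        List.getElem?_set_ne (h x (List.mem_cons_self))]

lemma getElem?_foldl_set_hit (l1 l2 : List (Int × Nat)) (v : Int) (k : Nat) (pos : Nat → Nat)
    (start : List Int) (p : Nat) (hp : pos k = p) (hlt : p < start.length)
    (h2 : ∀ kv ∈ l2, pos kv.2 ≠ p) :
    ((l1 ++ (v, k) :: l2).foldl (fun acc kv => acc.set (pos kv.2) kv.1) start)[p]? = some v := by
  rw [List.foldl_append, List.foldl_cons, getElem?_foldl_set_miss _ _ _ _ h2, hp,
      List.getElem?_set_self]
  rw [length_foldl_set]; exact hlt

lemma enumerate_zipIdx (b : List Int) (s : Nat) :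
    PySem.List.enumerate b (s : Int) = (b.zipIdx s).map (fun xv => ((xv.2 : Int), xv.1)) := by
  induction b generalizing s with
  | nil => rfl
  | cons x t ih =>
    rw [PySem.List.enumerate_cons, List.zipIdx_cons, List.map_cons]
    have h : (s : Int) + 1 = ((s + 1 : Nat) : Int) := by push_cast; ring
    rw [h, ih]

lemma divmod_unique (a b' j i g : Nat) (hb : b' < g) (hi : i < g)
    (h : a * g + b' = j * g + i) : a = j ∧ b' = i := by
  have ha : a = j := by
    rcases Nat.lt_trichotomy a j with h1 | h1 | h1
    · exfalso; nlinarith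
    · exact h1
    · exfalso; nlinarith
  subst ha; omega

-- B's scatter fold builds init ++ colFlat
lemma keyB (xs : List Int) (N g : Nat) (hN : 0 < N) (hg : 0 < g) (hlen : g * N ≤ xs.length)
    (init : List Int) :
    (PySem.List.enumerate (xs.take (g*N)) 0).foldl
      (fun acc kv =>
        PySem.List.pySetD acc
          ((init.length : Int) + PySem.Int.mod kv.1 (N : Int) * (g : Int) + PySem.Int.floordiv kv.1 (N : Int)) kv.2)
      (init ++ List.replicate (g*N) 0)
    = init ++ colFlat xs N g := by
  set b := xs.take (g*N) with hbdef
  have hb : b.length = g * N := by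
    rw [hbdef, List.length_take]; omega
  have hz : PySem.List.enumerate b 0 = (b.zipIdx 0).map (fun xv => ((xv.2 : Int), xv.1)) := by
    have := enumerate_zipIdx b 0
    simpa using this
  rw [hz, List.foldl_map]
  have hbody : (fun (acc : List Int) (xv : Int × Nat) =>
      PySem.List.pySetD acc
        ((init.length : Int) + PySem.Int.mod ((xv.2 : Int)) (N : Int) * (g : Int) + PySem.Int.floordiv ((xv.2 : Int)) (N : Int)) xv.1)
      = (fun (acc : List Int) (xv : Int × Nat) => acc.set (init.length + xv.2 % N * g + xv.2 / N) xv.1) := by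
    funext acc xv
    rw [PySem.Int.mod_natCast, PySem.Int.floordiv_natCast]
    have h1 : ((init.length : Int) + ((xv.2 % N : Nat) : Int) * (g : Int) + ((xv.2 / N : Nat) : Int))
        = ((init.length + xv.2 % N * g + xv.2 / N : Nat) : Int) := by push_cast; ring
    rw [h1, PySem.List.pySetD_natCast]
  rw [hbody]
  have hstartlen : (init ++ List.replicate (g*N) 0).length = init.length + g * N := by
    simp
  have hcol : colFlat xs N g = (List.range (N*g)).map (fun t => xs.getD ((t % g) * N + t / g) 0) :=
    colFlat_eq_map xs N g
  have hcollen : (colFlat xs N g).length = g * N := by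
    rw [hcol, List.length_map, List.length_range, Nat.mul_comm]
  apply List.ext_getElem?
  intro p
  have hlhslen : ((b.zipIdx 0).foldl
      (fun (acc : List Int) (kv : Int × Nat) => acc.set (init.length + kv.2 % N * g + kv.2 / N) kv.1)
      (init ++ List.replicate (g*N) 0)).length = init.length + g * N := by
    have h := length_foldl_set (b.zipIdx 0) (fun k => init.length + k % N * g + k / N)
      (init ++ List.replicate (g*N) 0)
    simp only [] at h
    rw [h, hstartlen]
  by_cases hcase : p < init.length + g * N
  case neg =>
    rw [List.getElem?_eq_none (by rw [hlhslen]; omega),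
        List.getElem?_eq_none (by rw [List.length_append, hcollen]; omega)]
  case pos =>
    by_cases hlo : p < init.length
    case pos =>
      have hmiss := getElem?_foldl_set_miss (b.zipIdx 0) (fun k => init.length + k % N * g + k / N)
        (init ++ List.replicate (g*N) 0) p (by
          intro kv hkv
          show init.length + kv.2 % N * g + kv.2 / N ≠ p
          exact (Nat.lt_of_lt_of_le hlo
            ((Nat.le_add_right _ _).trans (Nat.le_add_right _ _))).ne')
      simp only [] at hmiss
      rw [hmiss, List.getElem?_append_left (by omega), List.getElem?_append_left (by omega)]
    case neg =>
      -- init.length ≤ p < init.length + g*N : the hit case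
      replace hlo := Nat.le_of_not_lt hlo
      set t := p - init.length with ht
      have htlt : t < g * N := by omega
      set j := t / g with hj
      set i := t % g with hi
      have hig : i < g := Nat.mod_lt _ hg
      have hNg : t < N * g := by rw [Nat.mul_comm N g]; exact htlt
      have hjN : j < N := (Nat.div_lt_iff_lt_mul hg).mpr hNg
      set k := i * N + j with hk
      have hkb : k < g * N := by nlinarith
      have hkmod : k % N = j := by
        simp only [hk]; rw [Nat.add_comm, Nat.add_mul_mod_self_right]; exact Nat.mod_eq_of_lt hjN
      have hkdiv : k / N = i := by
        simp only [hk]; rw [Nat.add_comm, Nat.add_mul_div_right _ _ hN, Nat.div_eq_of_lt hjN,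
          Nat.zero_add]
      have hjgi : j * g + i = t := by
        simp only [hj, hi]; rw [Nat.add_comm]; exact Nat.mod_add_div' t g
      have hposk : init.length + k % N * g + k / N = p := by rw [hkmod, hkdiv]; omega
      -- decompose the zipIdx list around index k
      have hkblen : k < b.length := by omega
      have hsplit : b.zipIdx 0 = (b.take k).zipIdx 0 ++ (b[k], k) :: (b.drop (k+1)).zipIdx (k+1) := by
        conv_lhs => rw [← List.take_append_drop k b]
        rw [List.zipIdx_append, List.drop_eq_getElem_cons hkblen, List.zipIdx_cons,
            List.length_take, Nat.min_eq_left (le_of_lt hkblen), Nat.zero_add]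
      have hhit := getElem?_foldl_set_hit ((b.take k).zipIdx 0) ((b.drop (k+1)).zipIdx (k+1))
        b[k] k (fun k' => init.length + k' % N * g + k' / N)
        (init ++ List.replicate (g*N) 0) p hposk (by rw [hstartlen]; omega) (by
          intro kv hkv hcontra
          simp only [] at hcontra
          rcases List.mem_zipIdx hkv with ⟨h1, h2, _⟩
          rw [List.length_drop] at h2
          have hk'lt : kv.2 < g * N := by omega
          have hdlt : kv.2 / N < g := (Nat.div_lt_iff_lt_mul hN).mpr hk'lt
          have heq : kv.2 % N * g + kv.2 / N = j * g + i := by omega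
          rcases divmod_unique _ _ _ _ _ hdlt hig heq with ⟨hm, hd⟩
          have : kv.2 = i * N + j := by
            rw [← hm, ← hd]; exact (Nat.div_add_mod' kv.2 N).symm
          omega)
      simp only [] at hhit
      rw [hsplit, hhit]
      -- now the right-hand side at p
      rw [List.getElem?_append_right (by omega), hcol]
      have hpt : p - init.length = t := by omega
      rw [hpt, List.getElem?_map, List.getElem?_range hNg]
      simp only [Option.map_some]
      congr 1
      have hx : xs.getD ((t % g) * N + t / g) 0 = xs.getD k 0 := by rw [← hi, ← hj, ← hk]
      rw [hx, List.getD_eq_getElem?_getD, List.getElem?_eq_getElem (by omega : k < xs.length)]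
      simp only [Option.getD_some]
      exact List.getElem_take

-- ===== VERDICT (by name: the statement is the Claim_ definition above) =====
theorem distribute_index_spec : Claim_equal_distribute_index := by
  intro index n _ hn
  unfold Pre_distribute_index at hn
  unfold Spec_distribute_index
  simp only [distribute_index, distribute_index_alt]
  set xs := PySem.List.sorted index (fun x => x) false with hxs
  set G : Int := PySem.Int.floordiv (xs.length : Int) n with hGdef
  set odd : Int := (xs.length : Int) - G * n with hodd
  set oddL : List Int := if odd ≠ 0 then PySem.List.slice xs (some (-odd)) none else [] with hoddL
  by_cases hGpos : 0 < G
  case neg =>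
    rw [if_neg hGpos, PySem.List.pyRange_one_eq_nil (by omega)]
    simp [pyZipN]
  case pos =>
    rw [if_pos hGpos]
    have hpos : 0 < n := by
      rcases lt_or_gt_of_ne hn with hneg | hpos
      · exfalso
        have hG : G ≤ 0 := by
          rw [hGdef]; simp only [PySem.Int.floordiv]
          exact fdiv_nonpos_of_nonneg_of_neg _ _ (by positivity) hneg
        omega
      · exact hpos
    have hGn : G * n ≤ (xs.length : Int) := by
      conv_lhs => rw [hGdef]
      exact (PySem.Int.le_floordiv_iff_mul_le hpos).mp (le_of_eq hGdef.symm)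
    obtain ⟨N, rfl⟩ : ∃ N : Nat, n = (N : Int) := ⟨n.toNat, (Int.toNat_of_nonneg hpos.le).symm⟩
    obtain ⟨g, hg⟩ : ∃ g : Nat, G = (g : Int) := ⟨G.toNat, (Int.toNat_of_nonneg hGpos.le).symm⟩
    have hN : 0 < N := by exact_mod_cast hpos
    rw [hg] at hGn ⊢
    have hgpos : 0 < g := by
      have : (0 : Int) < (g : Int) := hg ▸ hGpos
      exact_mod_cast this
    have hlen : g * N ≤ xs.length := by exact_mod_cast hGn
    rw [keyA xs N g hGn oddL]
    have hbody : ((g : Int) * (N : Int)).toNat = g * N := by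
      rw [← Nat.cast_mul, Int.toNat_natCast]
    have hslice : PySem.List.slice xs none (some ((g : Int) * (N : Int))) = xs.take (g*N) := by
      rw [PySem.List.slice_to xs (by positivity), hbody]
    rw [hbody, hslice]
    exact (keyB xs N g hN hgpos hlen oddL).symm
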